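-- pv_equiv track=rewrite | github.com/kirito2104/Programmazione_dei_compilatori_es_e_altro_17-06-2025 | 1)es.1_stringhe_e_altro.py | string_filter
-- ===== SOURCE A (Python) =====
-- def string_filter(string, filter_string):
--     # Inizializza una stringa vuota per raccogliere i caratteri comuni
--     common_characters = ""
--     # Imposta il primo indice per il ciclo esterno
--     i = 0
--     # Il ciclo esterno itera attraverso ogni carattere nella stringa 'string'
--     while i < len(string):
--         # Imposta il secondo indice per il ciclo interno
--         j = 0
--         # Il ciclo interno itera attraverso ogni carattere nella stringa 'filter_string'
--         while j < len(filter_string):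
--             # Verifica se il carattere corrente in 'string' corrisponde a quello in 'filter_string'
--             # e che non sia già presente in 'common_characters' per evitare duplicati
--             if string[i] == filter_string[j] and string[i] not in common_characters:
--                 # Aggiunge il carattere comune a 'common_characters'
--                 common_characters += string[i]
--             # Incrementa l'indice del ciclo interno
--             j += 1
--         # Incrementa l'indice del ciclo esterno
--         i += 1
--
--     # Ritorna la stringa contenente tutti i caratteri comuni trovati
--     return common_characters
-- ===== SOURCE B (Python) =====
-- def string_filter(string, filter_string):
--     # Recursive head-removal: take the head char, delete all its later copies
--     # from the rest (so it can never reappear), recurse, and keep the head iff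
--     # it occurs in filter_string. No seen-accumulator and no nested scan of the
--     # already-built output; recursion depth = number of distinct chars.
--     if not string:
--         return ""
--     c = string[0]
--     rest = string_filter(string[1:].replace(c, ""), filter_string)
--     return c + rest if c in filter_string else rest
-- ===== Notes on version B (the rewrite author's own statement) =====
-- stated objective: alternative
-- what changed: Replaces A's nested index loops with inline not-in-output dedup by a recursion on the string that deletes every later copy of the head character before recursing, so no seen-accumulator or output scan exists at all.
import Mathlib
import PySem

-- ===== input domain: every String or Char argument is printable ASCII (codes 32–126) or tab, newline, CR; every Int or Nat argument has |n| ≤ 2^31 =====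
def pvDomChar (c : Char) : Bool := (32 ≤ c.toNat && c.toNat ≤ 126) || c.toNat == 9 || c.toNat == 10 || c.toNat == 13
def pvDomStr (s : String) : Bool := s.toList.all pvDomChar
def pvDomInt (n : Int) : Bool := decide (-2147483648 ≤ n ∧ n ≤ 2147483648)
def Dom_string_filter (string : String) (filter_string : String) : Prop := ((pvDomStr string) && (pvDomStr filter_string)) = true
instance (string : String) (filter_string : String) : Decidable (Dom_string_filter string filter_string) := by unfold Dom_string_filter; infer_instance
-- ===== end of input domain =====

-- B replaces A's nested while loops (inner filter scan with inline 'not in output' dedup)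
-- by a recursion on the string that deletes every later copy of the head character before
-- recursing: an alternative decomposition with no seen-accumulator and no output scan.

-- ===== PORT A =====
-- A: outer loop over the chars of `string`; inner loop over the chars of `filter_string`,
-- appending string[i] when it equals filter_string[j] and is not yet in the accumulator.
def string_filter (string : String) (filter_string : String) : String :=
  String.mk (string.toList.foldl (fun acc c =>
    filter_string.toList.foldl (fun acc2 f =>
      if c = f ∧ c ∉ acc2 then acc2 ++ [c] else acc2) acc) [])

-- ===== PORT B =====
-- B helper on char lists: string[1:].replace(c, "") is exactly the tail with every
-- occurrence of the single char c removed, i.e. rest.filter (· ≠ c); 'c in filter_string'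
-- for a single char c is exactly list membership of c in the filter's chars.
def sfB (l : List Char) (fl : List Char) : List Char :=
  match l with
  | [] => []
  | c :: rest =>
    let r := sfB (rest.filter (fun x => x ≠ c)) fl
    if c ∈ fl then c :: r else r
termination_by l.length
decreasing_by
  simpa using Nat.lt_succ_of_le ((List.length_filter_le _ _).trans (by simp))

def string_filter_alt (string : String) (filter_string : String) : String :=
  String.mk (sfB string.toList filter_string.toList)

-- ===== PRECONDITION & SPEC =====
def Spec_string_filter (string : String) (filter_string : String) (out : String) : Prop := out = string_filter_alt string filter_string
instance (string : String) (filter_string : String) (out : String) : Decidable (Spec_string_filter string filter_string out) := by unfold Spec_string_filter; infer_instance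

-- ===== CLAIM (what is proved, stated in full; the proofs are below) =====
def Claim_equal_string_filter : Prop := ∀ (string : String) (filter_string : String), Dom_string_filter string filter_string → Spec_string_filter string filter_string (string_filter string filter_string)

-- ===== LEMMAS AND PROOFS =====

-- A's inner loop never fires once the character is already in the accumulator.
lemma inner_of_mem (c : Char) (fl acc : List Char) (h : c ∈ acc) :
    fl.foldl (fun acc2 f => if c = f ∧ c ∉ acc2 then acc2 ++ [c] else acc2) acc = acc := by
  induction fl with
  | nil => rfl
  | cons f rest ih =>
    simp only [List.foldl_cons]
    rw [if_neg (by tauto)]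
    exact ih

-- Characterisation of A's inner loop: append c once iff c occurs in the filter and not yet in acc.
lemma inner_eq (c : Char) (fl acc : List Char) :
    fl.foldl (fun acc2 f => if c = f ∧ c ∉ acc2 then acc2 ++ [c] else acc2) acc
      = if c ∈ fl ∧ c ∉ acc then acc ++ [c] else acc := by
  induction fl generalizing acc with
  | nil => simp
  | cons f rest ih =>
    simp only [List.foldl_cons]
    by_cases hcf : c = f
    · by_cases hacc : c ∈ acc
      · rw [if_neg (by tauto), ih, if_neg (by tauto), if_neg (by tauto)]
      · rw [if_pos ⟨hcf, hacc⟩, inner_of_mem c rest _ (by simp),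
          if_pos ⟨by simp [hcf], hacc⟩]
    · rw [if_neg (by tauto), ih]
      simp [List.mem_cons, hcf]

-- A's outer loop is Set.add folded over the membership-filtered characters.
lemma outer_eq (cs fl acc : List Char) :
    cs.foldl (fun acc c =>
        fl.foldl (fun acc2 f => if c = f ∧ c ∉ acc2 then acc2 ++ [c] else acc2) acc) acc
      = (cs.filter (fun c => decide (c ∈ fl))).foldl PySem.Set.add acc := by
  induction cs generalizing acc with
  | nil => rfl
  | cons c rest ih =>
    simp only [List.foldl_cons, List.filter_cons]
    by_cases hfl : c ∈ fl
    · simp only [hfl, decide_true, if_pos, List.foldl_cons]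
      rw [inner_eq, ih]
      congr 1
      by_cases hacc : c ∈ acc
      · rw [if_neg (by tauto)]
        simp [PySem.Set.add, hacc]
      · rw [if_pos ⟨hfl, hacc⟩]
        simp [PySem.Set.add, hacc]
    · simp only [hfl, decide_false]
      rw [inner_eq, if_neg (by tauto), ih]
      simp

-- Folding Set.add over elements that avoid a prefix `pre` of the accumulator never touches `pre`.
lemma foldl_add_prefix (l : List Char) (pre acc : List Char) (h : ∀ x ∈ l, x ∉ pre) :
    l.foldl PySem.Set.add (pre ++ acc) = pre ++ l.foldl PySem.Set.add acc := by
  induction l generalizing acc with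
  | nil => rfl
  | cons x rest ih =>
    have hx : x ∉ pre := h x (by simp)
    simp only [List.foldl_cons]
    have : PySem.Set.add (pre ++ acc) x = pre ++ PySem.Set.add acc x := by
      simp [PySem.Set.add, hx]
      by_cases hm : x ∈ acc <;> simp [hm]
    rw [this, ih _ (fun y hy => h y (by simp [hy]))]

-- Adding an element already in the accumulator is a no-op, so copies of `a` can be filtered out.
lemma foldl_add_filter_mem (l acc : List Char) (a : Char) (ha : a ∈ acc) :
    l.foldl PySem.Set.add acc = (l.filter (fun x => x ≠ a)).foldl PySem.Set.add acc := by
  induction l generalizing acc with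
  | nil => rfl
  | cons x rest ih =>
    simp only [List.foldl_cons, List.filter_cons]
    by_cases hx : x = a
    · subst hx
      have : PySem.Set.add acc x = acc := by simp [PySem.Set.add, ha]
      simp [this, ih acc ha]
    · simp only [hx, ne_eq, not_false_eq_true, decide_true]
      exact ih _ (by simp [PySem.Set.add]; by_cases hm : x ∈ acc <;> simp [hm, ha])

-- Key structural fact about ordered dedup (dict.fromkeys order):
-- the head stays, and later copies of it may be deleted before deduping the tail.
lemma dedup_cons (c : Char) (l : List Char) :
    PySem.List.dedup (c :: l) = c :: PySem.List.dedup (l.filter (fun x => x ≠ c)) := by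
  rw [PySem.List.dedup_eq_ofList, PySem.List.dedup_eq_ofList,
      PySem.Set.ofList_eq_foldl, PySem.Set.ofList_eq_foldl]
  simp only [List.foldl_cons]
  have h1 : PySem.Set.add [] c = [c] := by simp [PySem.Set.add]
  rw [h1, foldl_add_filter_mem l [c] c (by simp)]
  have := foldl_add_prefix (l.filter (fun x => x ≠ c)) [c] []
    (fun x hx => by simp at hx ⊢; exact fun h => (hx.2 h).elim)
  simpa using this

-- B computes the ordered dedup of the membership-filtered characters.
lemma sfB_eq (l fl : List Char) :
    sfB l fl = PySem.List.dedup (l.filter (fun c => decide (c ∈ fl))) := by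
  induction hn : l.length using Nat.strong_induction_on generalizing l with
  | _ n ih =>
  match l with
  | [] => rw [sfB.eq_def]; simp [PySem.List.dedup_eq_ofList, PySem.Set.ofList_eq_foldl]
  | c :: rest =>
    rw [sfB.eq_def]
    simp only []
    have hrec : sfB (rest.filter (fun x => x ≠ c)) fl
        = PySem.List.dedup ((rest.filter (fun x => x ≠ c)).filter (fun x => decide (x ∈ fl))) := by
      apply ih ((rest.filter (fun x => x ≠ c)).length)
      · subst hn; simpa using Nat.lt_succ_of_le (List.length_filter_le _ _)
      · rfl
    by_cases hc : c ∈ fl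
    · simp only [hc, if_pos, hrec, List.filter_cons, decide_true]
      rw [dedup_cons]
      congr 1
      rw [List.filter_comm]
    · simp only [hc, hrec, List.filter_cons, decide_false]
      simp only [Bool.false_eq_true, if_false]
      congr 1
      rw [List.filter_comm]
      apply List.filter_eq_self.mpr
      intro x hx
      simp only [List.mem_filter] at hx
      simp only [ne_eq, decide_eq_true_eq]
      intro hxc
      subst hxc
      exact hc (by simpa using hx.2)

-- ===== VERDICT (by name: the statement is the Claim_ definition above) =====
theorem string_filter_spec : Claim_equal_string_filter := by
  intro s fs _
  show _ = _
  unfold string_filter string_filter_alt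
  rw [outer_eq, sfB_eq, PySem.List.dedup_eq_ofList, PySem.Set.ofList_eq_foldl]
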